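-- pv_equiv track=rewrite | github.com/laithalfar/Medical_NER | medspacy_pipeline.py | _guess_entity_type
-- ===== SOURCE A (Python) =====
-- from typing import Dict, Iterable, List, Optional, Sequence, Set
--
-- def _guess_entity_type(tree_numbers: List[str]) -> str:
--     """Map MeSH tree numbers to coarse entity types (disease, symptom, etc.)."""
--
--     if not tree_numbers:
--         return "ENTITY"
--
--     # store first letter of each element in tree_numbers
--     prefixes = {tn[0] for tn in tree_numbers if tn}
--
--     # if prefixes is a subset of {"C", "F"} then return "DISEASE"
--     if prefixes & {"C", "F"}:
--         return "DISEASE"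
--
--     # if prefixes is a subset of {"A"} then return "ANATOMY"
--     if prefixes & {"A"}:
--         return "ANATOMY"
--
--     # if prefixes is a subset of {"D"} then return "CHEMICAL"
--     if prefixes & {"D"}:
--         return "CHEMICAL"
--
--     # if prefixes is a subset of {"E"} then return "PROCEDURE"
--     if prefixes & {"E"}:
--         return "PROCEDURE"
--
--     # else return "ENTITY"
--     return "ENTITY"
-- ===== SOURCE B (Python) =====
-- # B: lookup-table + running-minimum rank in one pass, instead of building a
-- # set of prefixes and testing ordered set intersections.
-- _RANK = {'C': 0, 'F': 0, 'A': 1, 'D': 2, 'E': 3}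
-- _TYPE = {0: 'DISEASE', 1: 'ANATOMY', 2: 'CHEMICAL', 3: 'PROCEDURE'}
--
-- def _guess_entity_type(tree_numbers):
--     best = 4
--     for tn in tree_numbers:
--         if tn:
--             best = min(best, _RANK.get(tn[0], 4))
--     return _TYPE.get(best, 'ENTITY')
-- ===== Notes on version B (the rewrite author's own statement) =====
-- stated objective: simpler
-- what changed: Replaced the set-of-prefixes construction and ordered chain of set-intersection tests by a rank lookup table and a single running-minimum pass over the first letters, mapping the minimal rank to its entity type at the end.
import Mathlib
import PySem

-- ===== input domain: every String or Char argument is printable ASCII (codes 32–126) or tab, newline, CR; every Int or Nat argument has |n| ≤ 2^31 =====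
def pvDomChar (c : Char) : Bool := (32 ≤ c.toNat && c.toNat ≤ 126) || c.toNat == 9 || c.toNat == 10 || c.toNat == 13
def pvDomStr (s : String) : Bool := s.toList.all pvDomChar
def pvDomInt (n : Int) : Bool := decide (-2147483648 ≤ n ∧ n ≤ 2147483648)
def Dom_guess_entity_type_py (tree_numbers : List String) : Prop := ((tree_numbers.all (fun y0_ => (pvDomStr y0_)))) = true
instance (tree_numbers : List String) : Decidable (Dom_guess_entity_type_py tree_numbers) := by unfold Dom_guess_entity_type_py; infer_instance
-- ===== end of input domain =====

-- B replaces A's prefix-set plus ordered set-intersection chain by a rank table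
-- and a single running-minimum pass (objective: simpler); same return value everywhere.

-- ===== PORT A =====
-- tn[0] on a nonempty Python string: exact, the `.getD ' '` default is never
-- used because both ports only apply firstChar under the guard tn ≠ "".
def firstChar (tn : String) : Char := (PySem.Str.pyGet? tn 0).getD ' '

def guess_entity_type_py (tree_numbers : List String) : String :=
  if tree_numbers = [] then "ENTITY"
  else
    -- {tn[0] for tn in tree_numbers if tn}
    let prefixes : PySem.Set Char :=
      PySem.Set.ofList ((tree_numbers.filter (fun tn => tn ≠ "")).map firstChar)
    if PySem.Set.inter prefixes ['C', 'F'] ≠ [] then "DISEASE"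
    else if PySem.Set.inter prefixes ['A'] ≠ [] then "ANATOMY"
    else if PySem.Set.inter prefixes ['D'] ≠ [] then "CHEMICAL"
    else if PySem.Set.inter prefixes ['E'] ≠ [] then "PROCEDURE"
    else "ENTITY"

-- ===== PORT B =====
-- _RANK.get(tn[0], 4)
def rankOf (c : Char) : Int :=
  if c = 'C' then 0 else if c = 'F' then 0
  else if c = 'A' then 1 else if c = 'D' then 2 else if c = 'E' then 3 else 4

def guess_entity_type_py_alt (tree_numbers : List String) : String :=
  let best : Int :=
    tree_numbers.foldl (fun b tn => if tn ≠ "" then min b (rankOf (firstChar tn)) else b) 4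
  -- _TYPE.get(best, 'ENTITY')
  if best = 0 then "DISEASE" else if best = 1 then "ANATOMY"
  else if best = 2 then "CHEMICAL" else if best = 3 then "PROCEDURE" else "ENTITY"

-- ===== PRECONDITION & SPEC =====
def Spec_guess_entity_type_py (tree_numbers : List String) (out : String) : Prop := out = guess_entity_type_py_alt tree_numbers
instance (tree_numbers : List String) (out : String) : Decidable (Spec_guess_entity_type_py tree_numbers out) := by unfold Spec_guess_entity_type_py; infer_instance

-- ===== CLAIM (what is proved, stated in full; the proofs are below) =====
def Claim_equal_guess_entity_type_py : Prop := ∀ (tree_numbers : List String), Dom_guess_entity_type_py tree_numbers → Spec_guess_entity_type_py tree_numbers (guess_entity_type_py tree_numbers)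

-- ===== LEMMAS AND PROOFS =====

-- does some nonempty element's first letter satisfy p?
def hasPref (p : Char → Bool) (l : List String) : Bool :=
  l.any (fun tn => tn != "" && p (firstChar tn))

-- canonical value: the minimal rank occurring among first letters (4 if none)
def minRank (l : List String) : Int :=
  if hasPref (fun c => c == 'C' || c == 'F') l then 0
  else if hasPref (fun c => c == 'A') l then 1
  else if hasPref (fun c => c == 'D') l then 2
  else if hasPref (fun c => c == 'E') l then 3
  else 4

lemma minRank_le_four (l : List String) : minRank l ≤ 4 := by
  unfold minRank; split_ifs <;> omega

lemma rankOf_le_four (c : Char) : rankOf c ≤ 4 := by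
  unfold rankOf; split_ifs <;> omega

lemma minRank_cons_empty (l : List String) : minRank ("" :: l) = minRank l := by
  simp [minRank, hasPref]

lemma minRank_cons (tn : String) (l : List String) (h : tn ≠ "") :
    minRank (tn :: l) = min (rankOf (firstChar tn)) (minRank l) := by
  by_cases h1 : firstChar tn = 'C' <;> by_cases h2 : firstChar tn = 'F' <;>
    by_cases h3 : firstChar tn = 'A' <;> by_cases h4 : firstChar tn = 'D' <;>
    by_cases h5 : firstChar tn = 'E' <;>
      simp_all [minRank, hasPref, rankOf] <;> split_ifs <;> simp_all

lemma foldl_min_eq (l : List String) : ∀ b : Int, b ≤ 4 →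
    l.foldl (fun b tn => if tn ≠ "" then min b (rankOf (firstChar tn)) else b) b
      = min b (minRank l) := by
  induction l with
  | nil => intro b hb; simp [minRank, hasPref]; omega
  | cons tn l ih =>
    intro b hb
    rw [List.foldl_cons]
    by_cases h : tn = ""
    · subst h
      rw [show (if ("" : String) ≠ "" then min b (rankOf (firstChar "")) else b) = b from by simp,
        ih b hb, minRank_cons_empty]
    · rw [show (if tn ≠ "" then min b (rankOf (firstChar tn)) else b)
            = min b (rankOf (firstChar tn)) from by simp [h],
        ih _ (le_trans (min_le_right _ _) (rankOf_le_four _)), minRank_cons tn l h]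
      omega

lemma inter_ne_nil (s : PySem.Set Char) (t : List Char) :
    (PySem.Set.inter s t ≠ []) ↔ ∃ c, c ∈ s ∧ c ∈ t := by
  rw [← List.isEmpty_eq_false_iff, ← not_iff_not]
  push Not
  simp [List.eq_nil_iff_forall_not_mem, PySem.Set.mem_inter]

lemma interCF (l : List String) :
    (PySem.Set.inter (PySem.Set.ofList ((l.filter (fun tn => tn ≠ "")).map firstChar))
        ['C', 'F'] ≠ [])
      ↔ hasPref (fun c => c == 'C' || c == 'F') l = true := by
  rw [inter_ne_nil]
  simp [PySem.Set.mem_ofList, List.mem_filter, hasPref, List.any_eq_true]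
  aesop

lemma interOne (l : List String) (a : Char) :
    (PySem.Set.inter (PySem.Set.ofList ((l.filter (fun tn => tn ≠ "")).map firstChar))
        [a] ≠ [])
      ↔ hasPref (fun c => c == a) l = true := by
  rw [inter_ne_nil]
  simp [PySem.Set.mem_ofList, List.mem_filter, hasPref, List.any_eq_true]
  aesop

theorem guess_entity_type_py_spec_aux (l : List String) :
    guess_entity_type_py l = guess_entity_type_py_alt l := by
  unfold guess_entity_type_py guess_entity_type_py_alt
  rw [foldl_min_eq l 4 (by omega), min_eq_right (minRank_le_four l)]
  by_cases hnil : l = []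
  · subst hnil; simp [minRank, hasPref]
  · simp only [hnil, if_false]
    simp only [interCF, interOne]
    unfold minRank
    by_cases hCF : hasPref (fun c => c == 'C' || c == 'F') l = true <;>
      by_cases hA : hasPref (fun c => c == 'A') l = true <;>
      by_cases hD : hasPref (fun c => c == 'D') l = true <;>
      by_cases hE : hasPref (fun c => c == 'E') l = true <;>
      simp [hCF, hA, hD, hE]

-- ===== VERDICT (by name: the statement is the Claim_ definition above) =====
theorem guess_entity_type_py_spec : Claim_equal_guess_entity_type_py := by
  intro l _
  unfold Spec_guess_entity_type_py
  exact guess_entity_type_py_spec_aux l
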